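-- pv_equiv track=rewrite | github.com/ALU-BSE/Group-1-Cohort-3 | database/parse_xml.py | build_entities_from_xml_dict
-- ===== SOURCE A (Python) =====
-- def generete_id(prefix, counter):
--   return f'{prefix}_{counter:04d}'
--
-- def build_entities_from_xml_dict(data_dictionary):
--
--   user = []
--   transaction_category = []
--   transaction = []
--   system_log = []
--   service_centre = []
--   backup = []
--   sms = []
--
--   user_counter = 1
--   transaction_category_counter = 1
--   transaction_counter = 1
--   system_log_counter = 1
--   service_centre_counter = 1
--   backup_counter = 1
--   sms_counter = 1
--
--   xml_users = data_dictionary.get('smses', {}).get('sms', [])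
--
--   for xml_user in xml_users:
--     user_id = generete_id('US', user_counter)
--     user.append({
--       'id': user_id,
--       'mobile_number': xml_user.get('phone_number')
--     })
--     user_counter += 1
--
--     transaction_category_id = generete_id('TCAT', transaction_category_counter)
--     transaction_category.append({
--       'id': transaction_category_id,
--       'user_id': user_id
--     })
--     transaction_category_counter += 1
--
--     transaction_id = generete_id('TRNS', transaction_counter)
--     transaction.append({
--       'id': transaction_id,
--       'type': '1',
--       'date': xml_user.get('date'),
--       'user_id': user_id,
--       'transaction_category_id': transaction_category_id
--     })
--     transaction_counter += 1
--
--     system_log_id = generete_id('SLOG', system_log_counter)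
--     system_log.append({
--       'id': system_log_id,
--       'event': '1',
--       'date': xml_user.get('date'),
--       'transaction_id': transaction_id
--     })
--     system_log_counter += 1
--
--     service_centre_id = generete_id('SC', service_centre_counter)
--     service_centre.append({
--       'id': service_centre_id,
--       'mobile_number': xml_user.get('service_centre'),
--       'ISP_name': 'MTN'
--     })
--     service_centre_counter += 1
--
--     backup_id = generete_id('BCK', backup_counter)
--     backup.append({
--       'id': backup_id,
--       'date': xml_user.get('date'),
--       'user_id': user_id
--     })
--     backup_counter += 1
--
--     sms_id = generete_id('SMS', sms_counter)
--     sms.append({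
--       'id': sms_id,
--       'date': xml_user.get('date'),
--       'body': xml_user.get('body'),
--       'user_id': user_id,
--       'sub_id': '6'
--     })
--     sms_counter += 1
--
--   return {
--     'user': user,
--     'transaction_category': transaction_category,
--     'transaction': transaction,
--     'system_log': system_log,
--     'service_centre': service_centre,
--     'backup': backup,
--     'sms': sms,
--   }
-- ===== SOURCE B (Python) =====
-- def generete_id(prefix, counter):
--   return f'{prefix}_{counter:04d}'
--
-- # Declarative schema: entity name -> (id prefix, extra fields as (name, fn(i, x))).
-- SCHEMA = [
--   ('user', 'US', [
--     ('mobile_number', lambda i, x: x.get('phone_number'))]),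
--   ('transaction_category', 'TCAT', [
--     ('user_id', lambda i, x: generete_id('US', i))]),
--   ('transaction', 'TRNS', [
--     ('type', lambda i, x: '1'),
--     ('date', lambda i, x: x.get('date')),
--     ('user_id', lambda i, x: generete_id('US', i)),
--     ('transaction_category_id', lambda i, x: generete_id('TCAT', i))]),
--   ('system_log', 'SLOG', [
--     ('event', lambda i, x: '1'),
--     ('date', lambda i, x: x.get('date')),
--     ('transaction_id', lambda i, x: generete_id('TRNS', i))]),
--   ('service_centre', 'SC', [
--     ('mobile_number', lambda i, x: x.get('service_centre')),
--     ('ISP_name', lambda i, x: 'MTN')]),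
--   ('backup', 'BCK', [
--     ('date', lambda i, x: x.get('date')),
--     ('user_id', lambda i, x: generete_id('US', i))]),
--   ('sms', 'SMS', [
--     ('date', lambda i, x: x.get('date')),
--     ('body', lambda i, x: x.get('body')),
--     ('user_id', lambda i, x: generete_id('US', i)),
--     ('sub_id', lambda i, x: '6')]),
-- ]
--
-- def build_entities_from_xml_dict(data_dictionary):
--   xs = data_dictionary.get('smses', {}).get('sms', [])
--
--   def build(prefix, fields):
--     records = []
--     for i, x in enumerate(xs, 1):
--       record = {'id': generete_id(prefix, i)}
--       for field, fn in fields: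
--         record[field] = fn(i, x)
--       records.append(record)
--     return records
--
--   return {name: build(prefix, fields) for name, prefix, fields in SCHEMA}
-- ===== Notes on version B (the rewrite author's own statement) =====
-- stated objective: alternative
-- what changed: A's single fused loop with seven hard-coded append blocks and seven parallel counters is replaced by a data-driven design: a declarative SCHEMA table (entity name, id prefix, field-producer functions) interpreted by one generic builder, so the entity structure is data, not code.
import Mathlib
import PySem

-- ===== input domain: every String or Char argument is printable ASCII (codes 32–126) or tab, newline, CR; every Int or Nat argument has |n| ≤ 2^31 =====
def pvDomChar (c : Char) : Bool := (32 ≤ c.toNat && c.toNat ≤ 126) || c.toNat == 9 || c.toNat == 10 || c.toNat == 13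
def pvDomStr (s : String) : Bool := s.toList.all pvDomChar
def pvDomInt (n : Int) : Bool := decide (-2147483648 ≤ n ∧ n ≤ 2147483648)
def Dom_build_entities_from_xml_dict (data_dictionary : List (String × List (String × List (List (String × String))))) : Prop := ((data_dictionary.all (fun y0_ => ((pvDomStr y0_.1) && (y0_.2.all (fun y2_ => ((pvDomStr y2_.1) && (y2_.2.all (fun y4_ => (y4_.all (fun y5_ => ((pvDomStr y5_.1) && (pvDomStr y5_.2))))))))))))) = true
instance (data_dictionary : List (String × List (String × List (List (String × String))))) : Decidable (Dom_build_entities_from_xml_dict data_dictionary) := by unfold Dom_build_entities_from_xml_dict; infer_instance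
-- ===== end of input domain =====

-- B replaces A's fused seven-list/seven-counter loop by a declarative SCHEMA table of
-- (entity name, id prefix, field-producer functions) interpreted by one generic builder
-- (objective: alternative, data-driven decomposition; same O(n) cost).

-- dict.get(k, default) on an assoc list: first match, else the default (exact for Python dicts)
def pyAssocGetD {α : Type} (d : List (String × α)) (k : String) (dflt : α) : α :=
  match d.find? (fun p => p.1 == k) with
  | some p => p.2
  | none => dflt

-- dict.get(k) with no default: first match, else None (exact for Python dicts)
def pyAssocGet? (d : List (String × String)) (k : String) : Option String :=
  (d.find? (fun p => p.1 == k)).map (fun p => p.2)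

-- f'{prefix}_{counter:04d}' — exact for counter ≥ 0 (the only calls both programs make)
def generete_id (pfx : String) (counter : Int) : String :=
  let s := PySem.Int.toStr counter
  pfx ++ "_" ++ String.ofList (List.replicate (4 - s.toList.length) '0') ++ s

-- ===== PORT A =====
-- A's for-loop: seven accumulator lists and seven counters threaded through one pass
def pvLoopA (xs : List (List (String × String)))
    (user tc t sl sc bk sm : List (List (String × Option String)))
    (c1 c2 c3 c4 c5 c6 c7 : Int) :
    List (List (String × Option String)) × List (List (String × Option String)) ×
    List (List (String × Option String)) × List (List (String × Option String)) ×
    List (List (String × Option String)) × List (List (String × Option String)) ×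
    List (List (String × Option String)) :=
  match xs with
  | [] => (user, tc, t, sl, sc, bk, sm)
  | x :: rest =>
    let user_id := generete_id "US" c1
    let tcat_id := generete_id "TCAT" c2
    let trns_id := generete_id "TRNS" c3
    let slog_id := generete_id "SLOG" c4
    let sc_id := generete_id "SC" c5
    let bck_id := generete_id "BCK" c6
    let sms_id := generete_id "SMS" c7
    pvLoopA rest
      (user ++ [[("id", some user_id), ("mobile_number", pyAssocGet? x "phone_number")]])
      (tc ++ [[("id", some tcat_id), ("user_id", some user_id)]])
      (t ++ [[("id", some trns_id), ("type", some "1"), ("date", pyAssocGet? x "date"),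
              ("user_id", some user_id), ("transaction_category_id", some tcat_id)]])
      (sl ++ [[("id", some slog_id), ("event", some "1"), ("date", pyAssocGet? x "date"),
               ("transaction_id", some trns_id)]])
      (sc ++ [[("id", some sc_id), ("mobile_number", pyAssocGet? x "service_centre"),
               ("ISP_name", some "MTN")]])
      (bk ++ [[("id", some bck_id), ("date", pyAssocGet? x "date"), ("user_id", some user_id)]])
      (sm ++ [[("id", some sms_id), ("date", pyAssocGet? x "date"), ("body", pyAssocGet? x "body"),
               ("user_id", some user_id), ("sub_id", some "6")]])
      (c1 + 1) (c2 + 1) (c3 + 1) (c4 + 1) (c5 + 1) (c6 + 1) (c7 + 1)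

def build_entities_from_xml_dict (data_dictionary : List (String × List (String × List (List (String × String))))) : List (String × List (List (String × Option String))) :=
  let xml_users := pyAssocGetD (pyAssocGetD data_dictionary "smses" []) "sms" []
  let r := pvLoopA xml_users [] [] [] [] [] [] [] 1 1 1 1 1 1 1
  [("user", r.1), ("transaction_category", r.2.1), ("transaction", r.2.2.1),
   ("system_log", r.2.2.2.1), ("service_centre", r.2.2.2.2.1),
   ("backup", r.2.2.2.2.2.1), ("sms", r.2.2.2.2.2.2)]

-- ===== PORT B =====
-- Source B's SCHEMA: (entity name, id prefix, extra fields as (name, fn i x))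
def pvSchema : List (String × String × List (String × (Int → List (String × String) → Option String))) :=
  [("user", "US", [
      ("mobile_number", fun _ x => pyAssocGet? x "phone_number")]),
   ("transaction_category", "TCAT", [
      ("user_id", fun i _ => some (generete_id "US" i))]),
   ("transaction", "TRNS", [
      ("type", fun _ _ => some "1"),
      ("date", fun _ x => pyAssocGet? x "date"),
      ("user_id", fun i _ => some (generete_id "US" i)),
      ("transaction_category_id", fun i _ => some (generete_id "TCAT" i))]),
   ("system_log", "SLOG", [
      ("event", fun _ _ => some "1"),
      ("date", fun _ x => pyAssocGet? x "date"),
      ("transaction_id", fun i _ => some (generete_id "TRNS" i))]),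
   ("service_centre", "SC", [
      ("mobile_number", fun _ x => pyAssocGet? x "service_centre"),
      ("ISP_name", fun _ _ => some "MTN")]),
   ("backup", "BCK", [
      ("date", fun _ x => pyAssocGet? x "date"),
      ("user_id", fun i _ => some (generete_id "US" i))]),
   ("sms", "SMS", [
      ("date", fun _ x => pyAssocGet? x "date"),
      ("body", fun _ x => pyAssocGet? x "body"),
      ("user_id", fun i _ => some (generete_id "US" i)),
      ("sub_id", fun _ _ => some "6")])]

-- Source B's generic builder `build(prefix, fields)` over enumerate(xs, 1)
def pvBuild (xs : List (List (String × String))) (pfx : String)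
    (fields : List (String × (Int → List (String × String) → Option String))) :
    List (List (String × Option String)) :=
  (PySem.List.enumerate xs 1).map (fun p =>
    ("id", some (generete_id pfx p.1)) :: fields.map (fun f => (f.1, f.2 p.1 p.2)))

def build_entities_from_xml_dict_alt (data_dictionary : List (String × List (String × List (List (String × String))))) : List (String × List (List (String × Option String))) :=
  let xs := pyAssocGetD (pyAssocGetD data_dictionary "smses" []) "sms" []
  pvSchema.map (fun e => (e.1, pvBuild xs e.2.1 e.2.2))

-- ===== PRECONDITION & SPEC =====
def Spec_build_entities_from_xml_dict (data_dictionary : List (String × List (String × List (List (String × String))))) (out : List (String × List (List (String × Option String)))) : Prop := out = build_entities_from_xml_dict_alt data_dictionary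
instance (data_dictionary : List (String × List (String × List (List (String × String))))) (out : List (String × List (List (String × Option String)))) : Decidable (Spec_build_entities_from_xml_dict data_dictionary out) := by unfold Spec_build_entities_from_xml_dict; infer_instance

-- ===== CLAIM (what is proved, stated in full; the proofs are below) =====
def Claim_equal_build_entities_from_xml_dict : Prop := ∀ (data_dictionary : List (String × List (String × List (List (String × String))))), Dom_build_entities_from_xml_dict data_dictionary → Spec_build_entities_from_xml_dict data_dictionary (build_entities_from_xml_dict data_dictionary)

-- ===== LEMMAS AND PROOFS =====
-- A's loop result: each accumulator extended by a map over enumerate(xs, c)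
theorem pvLoopA_spec (xs : List (List (String × String)))
    (user tc t sl sc bk sm : List (List (String × Option String))) (c : Int) :
    pvLoopA xs user tc t sl sc bk sm c c c c c c c =
      (user ++ (PySem.List.enumerate xs c).map (fun p =>
        [("id", some (generete_id "US" p.1)), ("mobile_number", pyAssocGet? p.2 "phone_number")]),
       tc ++ (PySem.List.enumerate xs c).map (fun p =>
        [("id", some (generete_id "TCAT" p.1)), ("user_id", some (generete_id "US" p.1))]),
       t ++ (PySem.List.enumerate xs c).map (fun p =>
        [("id", some (generete_id "TRNS" p.1)), ("type", some "1"), ("date", pyAssocGet? p.2 "date"),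
         ("user_id", some (generete_id "US" p.1)), ("transaction_category_id", some (generete_id "TCAT" p.1))]),
       sl ++ (PySem.List.enumerate xs c).map (fun p =>
        [("id", some (generete_id "SLOG" p.1)), ("event", some "1"), ("date", pyAssocGet? p.2 "date"),
         ("transaction_id", some (generete_id "TRNS" p.1))]),
       sc ++ (PySem.List.enumerate xs c).map (fun p =>
        [("id", some (generete_id "SC" p.1)), ("mobile_number", pyAssocGet? p.2 "service_centre"),
         ("ISP_name", some "MTN")]),
       bk ++ (PySem.List.enumerate xs c).map (fun p =>
        [("id", some (generete_id "BCK" p.1)), ("date", pyAssocGet? p.2 "date"),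
         ("user_id", some (generete_id "US" p.1))]),
       sm ++ (PySem.List.enumerate xs c).map (fun p =>
        [("id", some (generete_id "SMS" p.1)), ("date", pyAssocGet? p.2 "date"),
         ("body", pyAssocGet? p.2 "body"), ("user_id", some (generete_id "US" p.1)),
         ("sub_id", some "6")])) := by
  induction xs generalizing user tc t sl sc bk sm c with
  | nil => simp [pvLoopA, PySem.List.enumerate_nil]
  | cons x rest ih =>
    simp [pvLoopA, PySem.List.enumerate_cons, ih]

-- ===== VERDICT (by name: the statement is the Claim_ definition above) =====
theorem build_entities_from_xml_dict_spec : Claim_equal_build_entities_from_xml_dict := by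
  intro d _
  unfold Spec_build_entities_from_xml_dict build_entities_from_xml_dict build_entities_from_xml_dict_alt
  simp only [pvLoopA_spec, List.nil_append, pvSchema, pvBuild, List.map]
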